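-- pv_equiv track=rewrite | github.com/SaltieRL/ReplayModels | data/convert_replays.py | get_ordered_columns
-- ===== SOURCE A (Python) =====
-- from typing import List
--
-- def get_ordered_columns(players_per_team: int) -> List[str]:
--     """
--     Return an ordered list of column names to be passed to a game dataframe.
--     :param players_per_team: Determines how many player columns to return.
--     :type players_per_team: int
--     :return: A list of column names.
--     :rtype: List[str]
--     """
--     x = players_per_team
--     non_player = ['ball_pos_x', 'ball_pos_y', 'ball_pos_z', 'ball_rot_x', 'ball_rot_y', 'ball_rot_z',
--                   'ball_vel_x', 'ball_vel_y', 'ball_vel_z', 'ball_ang_vel_x', 'ball_ang_vel_y', 'ball_ang_vel_z',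
--                   'game_seconds_remaining']
--     z_zero = ['z_0_pos_x', 'z_0_pos_y', 'z_0_pos_z', 'z_0_rot_x', 'z_0_rot_y', 'z_0_rot_z',
--               'z_0_vel_x', 'z_0_vel_y', 'z_0_vel_z', 'z_0_ang_vel_x', 'z_0_ang_vel_y', 'z_0_ang_vel_z',
--               'z_0_boost', 'z_0_boost_active', 'z_0_jump_active', 'z_0_double_jump_active', 'z_0_dodge_active',
--               'z_0_is_demo']
--     z_one = []
--     z_two = []
--     o_zero = []
--     o_one = []
--     o_two = []
--     for col in z_zero:
--         if x > 1:
--             z_one.append(col.replace('0', '1', 1))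
--         if x > 2:
--             z_two.append(col.replace('0', '2', 1))
--         o_zero.append(col.replace('z', 'o', 1))
--     if x > 1:
--         for col in o_zero:
--             o_one.append(col.replace('0', '1', 1))
--             if x > 2:
--                 o_two.append(col.replace('0', '2', 1))
--
--     columns_ordered = z_zero + z_one + z_two + o_zero + o_one + o_two + non_player
--     return columns_ordered
-- ===== SOURCE B (Python) =====
-- from typing import List
--
-- NON_PLAYER = ['ball_pos_x', 'ball_pos_y', 'ball_pos_z', 'ball_rot_x', 'ball_rot_y', 'ball_rot_z',
--               'ball_vel_x', 'ball_vel_y', 'ball_vel_z', 'ball_ang_vel_x', 'ball_ang_vel_y', 'ball_ang_vel_z',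
--               'game_seconds_remaining']
--
-- SUFFIXES = ['pos_x', 'pos_y', 'pos_z', 'rot_x', 'rot_y', 'rot_z',
--             'vel_x', 'vel_y', 'vel_z', 'ang_vel_x', 'ang_vel_y', 'ang_vel_z',
--             'boost', 'boost_active', 'jump_active', 'double_jump_active', 'dodge_active', 'is_demo']
--
-- def get_ordered_columns(players_per_team: int) -> List[str]:
--     """Build the column names compositionally: team, player index, suffix."""
--     n = min(max(players_per_team, 1), 3)
--     return [f'{team}_{p}_{suf}'
--             for team in ('z', 'o')
--             for p in range(n)
--             for suf in SUFFIXES] + NON_PLAYER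
-- ===== Notes on version B (the rewrite author's own statement) =====
-- stated objective: simpler
-- what changed: B builds each column name compositionally (team letter, clamped player index, bare suffix) in one nested comprehension over a clamp n = min(max(x,1),3), instead of A's template list mutated via repeated str.replace into five intermediate lists.
import Mathlib
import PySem

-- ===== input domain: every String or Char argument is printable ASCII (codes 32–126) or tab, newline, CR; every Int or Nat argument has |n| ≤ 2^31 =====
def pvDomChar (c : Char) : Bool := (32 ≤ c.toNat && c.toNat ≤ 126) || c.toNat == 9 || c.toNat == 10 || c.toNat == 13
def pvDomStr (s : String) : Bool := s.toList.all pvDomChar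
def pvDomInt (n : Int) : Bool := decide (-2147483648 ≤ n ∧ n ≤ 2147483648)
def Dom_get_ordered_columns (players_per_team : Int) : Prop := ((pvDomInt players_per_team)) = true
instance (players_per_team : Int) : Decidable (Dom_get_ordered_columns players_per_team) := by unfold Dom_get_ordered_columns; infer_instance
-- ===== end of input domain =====

-- B builds each column name compositionally (team, clamped player index, suffix) in one
-- nested comprehension, instead of A's template list mutated by repeated str.replace. (simpler)

-- ===== PORT A =====

-- hand port of Python's s.replace(old, new, 1) for NONEMPTY old (exact there; all of A's
-- calls use a one-character old): replace the first occurrence of old, left to right.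
def pvReplaceFirst : List Char → List Char → List Char → List Char
  | [], _old, _new => []
  | c :: rest, old, new =>
    if old <+: (c :: rest) then new ++ (c :: rest).drop old.length
    else c :: pvReplaceFirst rest old new

def pvReplaceFirstS (s old new : String) : String :=
  String.ofList (pvReplaceFirst s.toList old.toList new.toList)

def pvA_non_player : List String :=
  ["ball_pos_x", "ball_pos_y", "ball_pos_z", "ball_rot_x", "ball_rot_y", "ball_rot_z",
   "ball_vel_x", "ball_vel_y", "ball_vel_z", "ball_ang_vel_x", "ball_ang_vel_y", "ball_ang_vel_z",
   "game_seconds_remaining"]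

def pvA_z_zero : List String :=
  ["z_0_pos_x", "z_0_pos_y", "z_0_pos_z", "z_0_rot_x", "z_0_rot_y", "z_0_rot_z",
   "z_0_vel_x", "z_0_vel_y", "z_0_vel_z", "z_0_ang_vel_x", "z_0_ang_vel_y", "z_0_ang_vel_z",
   "z_0_boost", "z_0_boost_active", "z_0_jump_active", "z_0_double_jump_active",
   "z_0_dodge_active", "z_0_is_demo"]

def get_ordered_columns (players_per_team : Int) : List String :=
  let x := players_per_team
  -- first loop: builds z_one, z_two, o_zero
  let st := pvA_z_zero.foldl
    (fun (acc : List String × List String × List String) col =>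
      let z_one := if x > 1 then acc.1 ++ [pvReplaceFirstS col "0" "1"] else acc.1
      let z_two := if x > 2 then acc.2.1 ++ [pvReplaceFirstS col "0" "2"] else acc.2.1
      let o_zero := acc.2.2 ++ [pvReplaceFirstS col "z" "o"]
      (z_one, z_two, o_zero)) ([], [], [])
  -- second loop (guarded): builds o_one, o_two from o_zero
  let st2 :=
    if x > 1 then
      st.2.2.foldl
        (fun (acc : List String × List String) col =>
          let o_one := acc.1 ++ [pvReplaceFirstS col "0" "1"]
          let o_two := if x > 2 then acc.2 ++ [pvReplaceFirstS col "0" "2"] else acc.2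
          (o_one, o_two)) ([], [])
    else ([], [])
  pvA_z_zero ++ st.1 ++ st.2.1 ++ st.2.2 ++ st2.1 ++ st2.2 ++ pvA_non_player

-- ===== PORT B =====

def pvB_suffixes : List String :=
  ["pos_x", "pos_y", "pos_z", "rot_x", "rot_y", "rot_z",
   "vel_x", "vel_y", "vel_z", "ang_vel_x", "ang_vel_y", "ang_vel_z",
   "boost", "boost_active", "jump_active", "double_jump_active", "dodge_active", "is_demo"]

def pvB_non_player : List String :=
  ["ball_pos_x", "ball_pos_y", "ball_pos_z", "ball_rot_x", "ball_rot_y", "ball_rot_z",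
   "ball_vel_x", "ball_vel_y", "ball_vel_z", "ball_ang_vel_x", "ball_ang_vel_y", "ball_ang_vel_z",
   "game_seconds_remaining"]

def get_ordered_columns_alt (players_per_team : Int) : List String :=
  let n := min (max players_per_team 1) 3
  (["z", "o"].flatMap fun team =>
    (PySem.List.pyRange 0 n 1).flatMap fun p =>
      pvB_suffixes.map fun suf => team ++ "_" ++ PySem.Int.toStr p ++ "_" ++ suf)
  ++ pvB_non_player

-- ===== PRECONDITION & SPEC =====
def Spec_get_ordered_columns (players_per_team : Int) (out : List String) : Prop := out = get_ordered_columns_alt players_per_team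
instance (players_per_team : Int) (out : List String) : Decidable (Spec_get_ordered_columns players_per_team out) := by unfold Spec_get_ordered_columns; infer_instance

-- ===== CLAIM (what is proved, stated in full; the proofs are below) =====
def Claim_equal_get_ordered_columns : Prop := ∀ (players_per_team : Int), Dom_get_ordered_columns players_per_team → Spec_get_ordered_columns players_per_team (get_ordered_columns players_per_team)

-- ===== LEMMAS AND PROOFS =====

-- x appears in A only through the tests x > 1 and x > 2, and in B only through
-- min (max x 1) 3, so each of the three regions collapses to one closed computation.

theorem pv_case_le1 (x : Int) (h : x ≤ 1) :
    get_ordered_columns x = get_ordered_columns_alt x := by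
  have h1 : ¬ (x > 1) := by omega
  have h2 : ¬ (x > 2) := by omega
  have hn : min (max x 1) 3 = 1 := by omega
  have hA : get_ordered_columns x = get_ordered_columns 1 := by
    simp only [get_ordered_columns, h1, h2, if_false, gt_iff_lt]
    norm_num
  have hB : get_ordered_columns_alt x = get_ordered_columns_alt 1 := by
    simp only [get_ordered_columns_alt, hn]
    norm_num
  rw [hA, hB]; decide

theorem pv_case_eq2 (x : Int) (h : x = 2) :
    get_ordered_columns x = get_ordered_columns_alt x := by
  subst h; decide

theorem pv_case_ge3 (x : Int) (h : 3 ≤ x) :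
    get_ordered_columns x = get_ordered_columns_alt x := by
  have h1 : x > 1 := by omega
  have h2 : x > 2 := by omega
  have hn : min (max x 1) 3 = 3 := by omega
  have hA : get_ordered_columns x = get_ordered_columns 3 := by
    simp only [get_ordered_columns, gt_iff_lt, h1, h2, if_pos]
    norm_num
  have hB : get_ordered_columns_alt x = get_ordered_columns_alt 3 := by
    simp only [get_ordered_columns_alt, hn]
    norm_num
  rw [hA, hB]; decide

-- ===== VERDICT (by name: the statement is the Claim_ definition above) =====
theorem get_ordered_columns_spec : Claim_equal_get_ordered_columns := by
  intro x _
  unfold Spec_get_ordered_columns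
  rcases (by omega : x ≤ 1 ∨ x = 2 ∨ 3 ≤ x) with h | h | h
  · exact pv_case_le1 x h
  · exact pv_case_eq2 x h
  · exact pv_case_ge3 x h
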